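-- pv_equiv track=rewrite | github.com/AdityaP1502/monopoly-cli | display.py | createDice
-- ===== SOURCE A (Python) =====
-- def createDice(dice):
--     diceDisplay = [["  ", "  ", "  "],["  ", "  ", "  "],["  ", "  ", "  "]]
--     if dice == 1:
--         diceDisplay[1][1] = "* "
--
--     elif dice == 2:
--         diceDisplay[0][0] = "* "
--         diceDisplay[2][2] = "* "
--
--     elif dice == 3:
--         diceDisplay[0][0] = "* "
--         diceDisplay[1][1] = "* "
--         diceDisplay[2][2] = "* "
--
--     elif dice == 4:
--         diceDisplay[0][0] = "* "
--         diceDisplay[0][2] = "* "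
--         diceDisplay[2][0] = "* "
--         diceDisplay[2][2] = "* "
--
--     elif dice == 5:
--         diceDisplay[0][0] = "* "
--         diceDisplay[0][2] = "* "
--         diceDisplay[1][1] = "* "
--         diceDisplay[2][0] = "* "
--         diceDisplay[2][2] = "* "
--
--     elif dice == 6:
--         for i in range(3):
--             diceDisplay[i][0] = "* "
--             diceDisplay[i][2] = "* "
--
--     #ADD BORDER
--     for i in range(3):
--         diceDisplay[i] = ["# "] + diceDisplay[i] + ["# "]
--
--     return [["# ", "# ", "# ", "# ", "# "]] + diceDisplay + [["# ", "# ", "# ", "# ", "# "]]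
-- ===== SOURCE B (Python) =====
-- def createDice(dice):
--     # Closed-form per-cell rule: generate the whole 5x5 face (border included)
--     # in one comprehension; a pip sits at inner cell (r,c) iff a small
--     # arithmetic predicate on the dice value holds (standard dice symmetry:
--     # center iff odd, main-diagonal corners iff >=2, anti-diagonal corners
--     # iff >=4, side edges iff ==6). No grid mutation, no coordinate table.
--     d = dice if 1 <= dice <= 6 else 0
--
--     def cell(i, j):
--         if i % 4 == 0 or j % 4 == 0:
--             return "# "
--         r, c = i - 1, j - 1
--         if r == 1 and c == 1:
--             return "* " if d % 2 == 1 else "  "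
--         if r != 1 and c != 1:
--             return "* " if (d >= 2 if r == c else d >= 4) else "  "
--         if r == 1:
--             return "* " if d == 6 else "  "
--         return "  "
--
--     return [[cell(i, j) for j in range(5)] for i in range(5)]
-- ===== Notes on version B (the rewrite author's own statement) =====
-- stated objective: alternative
-- what changed: Instead of mutating a blank grid via a branch cascade and then wrapping it with border rows, B generates the entire 5x5 face (border included) in a single comprehension from a closed-form arithmetic predicate on (dice,row,col) exploiting dice-pip symmetry (center iff odd, main-diagonal corners iff >=2, anti-diagonal corners iff >=4, side edges iff ==6).
import Mathlib
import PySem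

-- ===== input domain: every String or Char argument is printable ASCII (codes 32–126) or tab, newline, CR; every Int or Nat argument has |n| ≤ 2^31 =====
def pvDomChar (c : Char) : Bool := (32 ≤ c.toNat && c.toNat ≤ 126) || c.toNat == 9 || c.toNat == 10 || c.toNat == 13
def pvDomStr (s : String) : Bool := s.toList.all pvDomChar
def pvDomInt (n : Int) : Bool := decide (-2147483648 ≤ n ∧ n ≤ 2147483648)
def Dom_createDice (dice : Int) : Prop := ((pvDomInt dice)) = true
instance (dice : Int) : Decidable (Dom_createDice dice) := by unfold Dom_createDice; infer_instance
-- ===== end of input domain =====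

-- B replaces A's mutate-then-wrap branch cascade with one closed-form per-cell predicate
-- generating the whole bordered face (objective: alternative).


-- ===== PORT A =====
-- diceDisplay[r][c] = v  (indices are literal in-range naturals in A)
def pvSetA (g : List (List String)) (r c : Nat) (v : String) : List (List String) :=
  g.set r ((g.getD r []).set c v)

def createDice (dice : Int) : List (List String) :=
  let d0 : List (List String) := [["  ", "  ", "  "], ["  ", "  ", "  "], ["  ", "  ", "  "]]
  let d1 :=
    if dice = 1 then pvSetA d0 1 1 "* "
    else if dice = 2 then pvSetA (pvSetA d0 0 0 "* ") 2 2 "* "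
    else if dice = 3 then pvSetA (pvSetA (pvSetA d0 0 0 "* ") 1 1 "* ") 2 2 "* "
    else if dice = 4 then
      pvSetA (pvSetA (pvSetA (pvSetA d0 0 0 "* ") 0 2 "* ") 2 0 "* ") 2 2 "* "
    else if dice = 5 then
      pvSetA (pvSetA (pvSetA (pvSetA (pvSetA d0 0 0 "* ") 0 2 "* ") 1 1 "* ") 2 0 "* ") 2 2 "* "
    else if dice = 6 then
      (List.range 3).foldl (fun g i => pvSetA (pvSetA g i 0 "* ") i 2 "* ") d0
    else d0
  -- ADD BORDER: diceDisplay[i] = ["# "] + diceDisplay[i] + ["# "]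
  let d2 := (List.range 3).foldl (fun g i => g.set i (["# "] ++ g.getD i [] ++ ["# "])) d1
  [["# ", "# ", "# ", "# ", "# "]] ++ d2 ++ [["# ", "# ", "# ", "# ", "# "]]

-- ===== PORT B =====
-- the per-cell rule of Source B (i, j over range(5); inner coordinates r = i-1, c = j-1)
def pvCellB (d : Int) (i j : Nat) : String :=
  if i % 4 == 0 || j % 4 == 0 then "# "
  else
    let r := i - 1
    let c := j - 1
    if r == 1 && c == 1 then (if PySem.Int.mod d 2 == 1 then "* " else "  ")
    else if r != 1 && c != 1 then
      (if (if r == c then 2 ≤ d else 4 ≤ d) then "* " else "  ")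
    else if r == 1 then (if d == 6 then "* " else "  ")
    else "  "

def createDice_alt (dice : Int) : List (List String) :=
  let d : Int := if 1 ≤ dice ∧ dice ≤ 6 then dice else 0
  (List.range 5).map (fun i => (List.range 5).map (fun j => pvCellB d i j))

-- ===== PRECONDITION & SPEC =====
def Spec_createDice (dice : Int) (out : List (List String)) : Prop := out = createDice_alt dice
instance (dice : Int) (out : List (List String)) : Decidable (Spec_createDice dice out) := by unfold Spec_createDice; infer_instance

-- ===== CLAIM (what is proved, stated in full; the proofs are below) =====
def Claim_equal_createDice : Prop := ∀ (dice : Int), Dom_createDice dice → Spec_createDice dice (createDice dice)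

-- ===== LEMMAS AND PROOFS =====

-- ===== VERDICT (by name: the statement is the Claim_ definition above) =====
theorem createDice_spec : Claim_equal_createDice := by
  intro dice _
  unfold Spec_createDice
  by_cases h1 : dice = 1
  · subst h1; rfl
  by_cases h2 : dice = 2
  · subst h2; rfl
  by_cases h3 : dice = 3
  · subst h3; rfl
  by_cases h4 : dice = 4
  · subst h4; rfl
  by_cases h5 : dice = 5
  · subst h5; rfl
  by_cases h6 : dice = 6
  · subst h6; rfl
  · have hd : (if 1 ≤ dice ∧ dice ≤ 6 then dice else (0 : Int)) = 0 := by
      rw [if_neg]; omega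
    simp only [createDice, createDice_alt, hd, h1, h2, h3, h4, h5, h6, if_false]
    rfl
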